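-- pv_equiv track=rewrite | github.com/reachsumit/dp-yt-python-solutions | lecture14.py | lecture14
-- ===== SOURCE A (Python) =====
-- def lecture14(coins, total):
--     # let's assume column 0 represents add count 1 represents even count
--     dp = [[0, 0] for i in range(total + 1)]
--     dp[0][0], dp[0][1] = 0, 1
--
--     for i in range(total + 1):
--         for coin in coins:
--             if i - coin >= 0:
--                 dp[i][0] += dp[i-coin][1]
--                 dp[i][1] += dp[i-coin][0]
--
--     return dp[total][1]  # return index 0 if asked for odd number of coins
-- ===== SOURCE B (Python) =====
-- def lecture14(coins, total):
--     # Pair-composition DP: an even-length sequence is a sequence of coin pairs.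
--     # Only positive denominations are meaningful: with a coin <= 0 the count of
--     # even-length sequences reaching `total` is not a finite number.
--     if total < 0:
--         raise ValueError("total must be non-negative")
--     if any(c < 1 for c in coins):
--         raise ValueError("coin denominations must be positive")
--     pairsum = [0] * (total + 1)
--     for c1 in coins:
--         for c2 in coins:
--             s = c1 + c2
--             if 0 <= s <= total:
--                 pairsum[s] += 1
--     sums = [(s, c) for s, c in enumerate(pairsum) if c]
--     g = [1]
--     for i in range(1, total + 1):
--         g.append(sum(c * g[i - s] for s, c in sums if s <= i))
--     return g[total]
-- ===== Notes on version B (the rewrite author's own statement) =====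
-- stated objective: alternative
-- what changed: Replaces the (total+1)x2 odd/even parity table with a one-off pair-sum histogram (ordered pairs of coins summing to s) followed by a single 1D composition DP over pair sums, eliminating the parity columns entirely.
-- outside the precondition, e.g. on lecture14([0, 2], 2): A returns 1, B raises ValueError
import Mathlib
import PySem

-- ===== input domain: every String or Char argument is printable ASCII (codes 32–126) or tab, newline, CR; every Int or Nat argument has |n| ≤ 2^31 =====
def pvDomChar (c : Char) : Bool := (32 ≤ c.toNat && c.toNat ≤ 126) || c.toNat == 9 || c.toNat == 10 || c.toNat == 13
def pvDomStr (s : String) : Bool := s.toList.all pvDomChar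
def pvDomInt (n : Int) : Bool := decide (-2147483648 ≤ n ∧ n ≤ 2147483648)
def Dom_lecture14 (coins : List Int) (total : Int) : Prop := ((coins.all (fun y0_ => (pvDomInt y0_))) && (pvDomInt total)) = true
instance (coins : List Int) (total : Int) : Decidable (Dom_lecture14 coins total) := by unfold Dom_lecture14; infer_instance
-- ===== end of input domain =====

-- B replaces A's odd/even parity table with a pair-sum histogram + 1D composition DP (alternative algorithm, similar cost).

-- ===== PORT A =====
def lecture14 (coins : List Int) (total : Int) : Int :=
  let dp0 : List (Int × Int) := (PySem.List.pyRange 0 (total + 1) 1).map (fun _ => (0, 0))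
  let dp1 := dp0.set 0 (0, 1)
  let dp2 := (PySem.List.pyRange 0 (total + 1) 1).foldl (fun dp i =>
      coins.foldl (fun dp coin =>
        if i - coin ≥ 0 then
          let prev := ((PySem.List.pyGet? dp (i - coin)).getD (0, 0))
          let cur := ((PySem.List.pyGet? dp i).getD (0, 0))
          let dp' := dp.set i.toNat (cur.1 + prev.2, cur.2)
          let prev2 := ((PySem.List.pyGet? dp' (i - coin)).getD (0, 0))
          let cur2 := ((PySem.List.pyGet? dp' i).getD (0, 0))
          dp'.set i.toNat (cur2.1, cur2.2 + prev2.1)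
        else dp) dp) dp1
  ((PySem.List.pyGet? dp2 total).getD (0, 0)).2

-- ===== PORT B =====
-- where Source B raises ValueError (total < 0, or a coin < 1) the port returns 0; those inputs are outside Pre_
def lecture14_alt (coins : List Int) (total : Int) : Int :=
  if total < 0 then 0 else
  if coins.any (fun c => c < 1) then 0 else
  let ps0 : List Int := (PySem.List.pyRange 0 (total + 1) 1).map (fun _ => 0)
  let ps := coins.foldl (fun ps c1 =>
      coins.foldl (fun ps c2 =>
        let s := c1 + c2
        if 0 ≤ s ∧ s ≤ total then
          ps.set s.toNat (((PySem.List.pyGet? ps s).getD 0) + 1)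
        else ps) ps) ps0
  let sums := (PySem.List.enumerate ps).filter (fun p => p.2 != 0)
  let g := (PySem.List.pyRange 1 (total + 1) 1).foldl (fun (g : Array Int) i =>
      g.push ((sums.map (fun p =>
        if p.1 ≤ i then p.2 * g.getD (i - p.1).toNat 0 else 0)).sum)) #[1]
  g.getD total.toNat 0

-- ===== PRECONDITION & SPEC =====
-- Pre_ excludes inputs where A raises IndexError (total < 0, or a coin ≤ -1 making i-coin exceed the table),
-- and inputs containing a coin ≤ 0 on which A still returns: with a 0 coin the true count of even-length
-- sequences is infinite, so A's finite value there is an accident of its in-place same-index update order;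
-- B itself raises ValueError on those inputs.
def Pre_lecture14 (coins : List Int) (total : Int) : Prop :=
  0 ≤ total ∧ ∀ c ∈ coins, 1 ≤ c
instance (coins : List Int) (total : Int) : Decidable (Pre_lecture14 coins total) := by
  unfold Pre_lecture14; infer_instance
def pvWitness_lecture14 : List Int × Int := ([1, 2], 4)

def Spec_lecture14 (coins : List Int) (total : Int) (out : Int) : Prop := out = lecture14_alt coins total
instance (coins : List Int) (total : Int) (out : Int) : Decidable (Spec_lecture14 coins total out) := by unfold Spec_lecture14; infer_instance

-- ===== CLAIM (what is proved, stated in full; the proofs are below) =====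
def Claim_equal_lecture14 : Prop := ∀ (coins : List Int) (total : Int), Dom_lecture14 coins total → Pre_lecture14 coins total → Spec_lecture14 coins total (lecture14 coins total)

-- ===== LEMMAS AND PROOFS =====

-- Mathematical spec: Of/Ef coins j = number of odd/even-length sequences of coins summing to j.
mutual
def Of (coins : List Int) : Nat → Int
  | 0 => 0
  | (i+1) => (coins.attach.map (fun c =>
      if h : 1 ≤ c.1 ∧ c.1 ≤ ((i : Int) + 1) then Ef coins (i + 1 - c.1.toNat) else 0)).sum
  termination_by i => i
  decreasing_by omega
def Ef (coins : List Int) : Nat → Int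
  | 0 => 1
  | (i+1) => (coins.attach.map (fun c =>
      if h : 1 ≤ c.1 ∧ c.1 ≤ ((i : Int) + 1) then Of coins (i + 1 - c.1.toNat) else 0)).sum
  termination_by i => i
  decreasing_by omega
end

-- ordered pairs of coins summing to s
def cntI (coins : List Int) (s : Int) : Int :=
  (coins.map (fun c1 => (coins.map (fun c2 => if c1 + c2 = s then (1 : Int) else 0)).sum)).sum

-- the inner loop body of port A, named for the proofs (definitionally equal to the port's lambda)
def stepA (coins : List Int) (dp : List (Int × Int)) (i : Int) : List (Int × Int) :=
  coins.foldl (fun dp coin =>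
    if i - coin ≥ 0 then
      let prev := ((PySem.List.pyGet? dp (i - coin)).getD (0, 0))
      let cur := ((PySem.List.pyGet? dp i).getD (0, 0))
      let dp' := dp.set i.toNat (cur.1 + prev.2, cur.2)
      let prev2 := ((PySem.List.pyGet? dp' (i - coin)).getD (0, 0))
      let cur2 := ((PySem.List.pyGet? dp' i).getD (0, 0))
      dp'.set i.toNat (cur2.1, cur2.2 + prev2.1)
    else dp) dp

-- the loop bodies of port B, named for the proofs (definitionally equal to the port's lambdas)
def pairStep (total c1 : Int) (ps : List Int) (c2 : Int) : List Int :=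
  let s := c1 + c2
  if 0 ≤ s ∧ s ≤ total then ps.set s.toNat (((PySem.List.pyGet? ps s).getD 0) + 1) else ps

def pairFold (coins : List Int) (total : Int) : List Int :=
  coins.foldl (fun ps c1 => coins.foldl (pairStep total c1) ps)
    ((PySem.List.pyRange 0 (total + 1) 1).map (fun _ => 0))

def gStep (sums : List (Int × Int)) (g : Array Int) (i : Int) : Array Int :=
  g.push ((sums.map (fun p =>
    if p.1 ≤ i then p.2 * g.getD (i - p.1).toNat 0 else 0)).sum)

lemma lecture14_eq (coins : List Int) (total : Int) :
    lecture14 coins total =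
    ((PySem.List.pyGet?
      ((PySem.List.pyRange 0 (total + 1) 1).foldl (stepA coins)
        (((PySem.List.pyRange 0 (total + 1) 1).map (fun _ => ((0 : Int), (0 : Int)))).set 0 (0, 1)))
      total).getD (0, 0)).2 := rfl

lemma lecture14_alt_eq (coins : List Int) (total : Int) :
    lecture14_alt coins total =
    if total < 0 then 0 else
    if coins.any (fun c => c < 1) then 0 else
    ((PySem.List.pyRange 1 (total + 1) 1).foldl
      (gStep ((PySem.List.enumerate (pairFold coins total)).filter (fun p => p.2 != 0)))
      #[1]).getD total.toNat 0 := rfl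

-- unfolding Of/Ef without attach/dite
lemma Of_succ_eq (coins : List Int) (i : Nat) :
    Of coins (i + 1) =
    (coins.map (fun c => if 1 ≤ c ∧ c ≤ ((i : Int) + 1) then Ef coins (i + 1 - c.toNat) else 0)).sum := by
  rw [Of]; simp

lemma Ef_succ_eq (coins : List Int) (i : Nat) :
    Ef coins (i + 1) =
    (coins.map (fun c => if 1 ≤ c ∧ c ≤ ((i : Int) + 1) then Of coins (i + 1 - c.toNat) else 0)).sum := by
  rw [Ef]; simp

lemma Of_eq_sum (coins : List Int) (j : Nat) :
    Of coins j =
    (coins.map (fun c => if 1 ≤ c ∧ c ≤ (j : Int) then Ef coins (j - c.toNat) else 0)).sum := by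
  cases j with
  | zero =>
    rw [Of]
    refine (List.sum_eq_zero ?_).symm
    intro x hx
    obtain ⟨c, hc, rfl⟩ := List.mem_map.mp hx
    have h : ¬ (1 ≤ c ∧ c ≤ ((0 : Nat) : Int)) := by omega
    exact if_neg h
  | succ i => rw [Of_succ_eq]; norm_num

lemma Ef_eq_sum (coins : List Int) (j : Nat) (hj : 1 ≤ j) :
    Ef coins j =
    (coins.map (fun c => if 1 ≤ c ∧ c ≤ (j : Int) then Of coins (j - c.toNat) else 0)).sum := by
  cases j with
  | zero => omega
  | succ i => rw [Ef_succ_eq]; norm_num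

-- sum over two list indices commutes (used to regroup the pair sums)
lemma sum_map_swap {α β : Type} (l1 : List α) (l2 : List β) (f : α → β → Int) :
    (l1.map (fun a => (l2.map (f a)).sum)).sum
      = (l2.map (fun b => (l1.map (fun a => f a b)).sum)).sum := by
  induction l1 with
  | nil => simp [List.sum_eq_zero]
  | cons x t ih => simp [ih, ← List.sum_map_add]

-- a sum of 'if t = s' over a Nodup list picks the single matching element
lemma sum_ite_mem (S : List Int) (hS : S.Nodup) (t : Int) (F : Int → Int) :
    (S.map (fun s => if t = s then F s else 0)).sum = if t ∈ S then F t else 0 := by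
  induction S with
  | nil => simp
  | cons x t' ih =>
    rcases List.nodup_cons.mp hS with ⟨hx, hnd⟩
    by_cases h : t = x
    · subst h
      simp [ih hnd, hx]
    · simp [h, ih hnd]

-- the pair-composition recurrence: Ef i+1 = Σ_{s=1..i+1} cntI s * Ef (i+1-s)
lemma Ef_comp (coins : List Int) (h1 : ∀ c ∈ coins, 1 ≤ c) (i : Nat) :
    Ef coins (i + 1) =
    ((PySem.List.pyRange 1 (((i : Int) + 1) + 1) 1).map
      (fun s => cntI coins s * Ef coins (((i : Int) + 1 - s)).toNat)).sum := by
  have hterm : ∀ s : Int, cntI coins s * Ef coins (((i : Int) + 1 - s)).toNat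
      = (coins.map (fun c1 => (coins.map (fun c2 =>
          if c1 + c2 = s then Ef coins (((i : Int) + 1 - s)).toNat else 0)).sum)).sum := by
    intro s
    unfold cntI
    rw [← List.sum_map_mul_right]
    congr 1
    apply List.map_congr_left
    intro c1 _
    rw [← List.sum_map_mul_right]
    congr 1
    apply List.map_congr_left
    intro c2 _
    simp [ite_mul]
  have hrhs : ((PySem.List.pyRange 1 (((i : Int) + 1) + 1) 1).map
      (fun s => cntI coins s * Ef coins (((i : Int) + 1 - s)).toNat)).sum
      = (coins.map (fun c1 => (coins.map (fun c2 =>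
          if 1 ≤ c1 + c2 ∧ c1 + c2 < (i : Int) + 1 + 1
          then Ef coins (((i : Int) + 1 - (c1 + c2))).toNat else 0)).sum)).sum := by
    rw [List.map_congr_left (fun s _ => hterm s), sum_map_swap]
    apply congrArg List.sum
    apply List.map_congr_left
    intro c1 _
    rw [sum_map_swap]
    apply congrArg List.sum
    apply List.map_congr_left
    intro c2 _
    rw [sum_ite_mem _ (PySem.List.nodup_pyRange_one _ _) (c1 + c2)
      (fun s => Ef coins (((i : Int) + 1 - s)).toNat)]
    simp only [PySem.List.mem_pyRange_one]
  rw [hrhs, Ef_succ_eq]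
  apply congrArg List.sum
  apply List.map_congr_left
  intro c1 hc1
  have h1c := h1 c1 hc1
  rw [Of_eq_sum]
  by_cases hcle : c1 ≤ (i : Int) + 1
  · rw [if_pos ⟨h1c, hcle⟩]
    apply congrArg List.sum
    apply List.map_congr_left
    intro c2 hc2
    have h2c := h1 c2 hc2
    by_cases h2 : 1 ≤ c2 ∧ c2 ≤ ((i + 1 - c1.toNat : Nat) : Int)
    · rw [if_pos h2, if_pos (show 1 ≤ c1 + c2 ∧ c1 + c2 < (i : Int) + 1 + 1 by
        constructor <;> omega)]
      congr 1
      omega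
    · rw [if_neg h2, if_neg (by omega)]
  · rw [if_neg (fun hh => hcle hh.2)]
    refine (List.sum_eq_zero ?_).symm
    intro x hx
    obtain ⟨c2, hc2, rfl⟩ := List.mem_map.mp hx
    have h2c := h1 c2 hc2
    exact if_neg (by omega)

-- ===== port A: loop characterisation =====

lemma stepA_inner (coins : List Int) (i : Int) (hi1 : 1 ≤ i) :
    ∀ (l : List Int), (∀ c ∈ l, 1 ≤ c) →
    ∀ (dp : List (Int × Int)) (v : Int × Int),
      i.toNat < dp.length →
      (∀ j : Nat, j < i.toNat → dp[j]? = some (Of coins j, Ef coins j)) →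
      dp[i.toNat]? = some v →
      (l.foldl (fun dp coin =>
        if i - coin ≥ 0 then
          let prev := ((PySem.List.pyGet? dp (i - coin)).getD (0, 0))
          let cur := ((PySem.List.pyGet? dp i).getD (0, 0))
          let dp' := dp.set i.toNat (cur.1 + prev.2, cur.2)
          let prev2 := ((PySem.List.pyGet? dp' (i - coin)).getD (0, 0))
          let cur2 := ((PySem.List.pyGet? dp' i).getD (0, 0))
          dp'.set i.toNat (cur2.1, cur2.2 + prev2.1)
        else dp) dp)
      = dp.set i.toNat
          (v.1 + (l.map (fun c => if 1 ≤ c ∧ c ≤ i then Ef coins (i.toNat - c.toNat) else 0)).sum,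
           v.2 + (l.map (fun c => if 1 ≤ c ∧ c ≤ i then Of coins (i.toNat - c.toNat) else 0)).sum) := by
  intro l
  induction l with
  | nil =>
    intro _ dp v hlen _ hv
    obtain ⟨hlt', hv'⟩ := List.getElem?_eq_some_iff.mp hv
    simp only [List.foldl_nil, List.map_nil, List.sum_nil, add_zero]
    rw [← hv', List.set_getElem_self hlt']
  | cons c t ih =>
    intro hl dp v hlen hrow hv
    have hc : 1 ≤ c := hl c (List.mem_cons_self)
    by_cases hg : i - c ≥ 0
    · have hj : (i - c).toNat = i.toNat - c.toNat := by omega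
      have hjlt : i.toNat - c.toNat < i.toNat := by omega
      have hprev : PySem.List.pyGet? dp (i - c)
          = some (Of coins (i.toNat - c.toNat), Ef coins (i.toNat - c.toNat)) := by
        rw [PySem.List.pyGet?_of_nonneg dp hg, hj]; exact hrow _ hjlt
      have hcur : PySem.List.pyGet? dp i = some v := by
        rw [PySem.List.pyGet?_of_nonneg dp (by omega)]; exact hv
      have hprev2 : PySem.List.pyGet?
          (dp.set i.toNat (v.1 + Ef coins (i.toNat - c.toNat), v.2)) (i - c)
          = some (Of coins (i.toNat - c.toNat), Ef coins (i.toNat - c.toNat)) := by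
        rw [PySem.List.pyGet?_of_nonneg _ hg, hj, List.getElem?_set_ne (by omega)]
        exact hrow _ hjlt
      have hcur2 : PySem.List.pyGet?
          (dp.set i.toNat (v.1 + Ef coins (i.toNat - c.toNat), v.2)) i
          = some (v.1 + Ef coins (i.toNat - c.toNat), v.2) := by
        rw [PySem.List.pyGet?_of_nonneg _ (by omega)]
        simp only [List.getElem?_set_self hlen]
      rw [List.foldl_cons]
      simp only [if_pos hg, hprev, hcur, hprev2, hcur2, Option.getD_some, List.set_set]
      have ih' := ih (fun x hx => hl x (List.mem_cons_of_mem _ hx))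
          (dp.set i.toNat (v.1 + Ef coins (i.toNat - c.toNat), v.2 + Of coins (i.toNat - c.toNat)))
          (v.1 + Ef coins (i.toNat - c.toNat), v.2 + Of coins (i.toNat - c.toNat))
          (by simpa using hlen)
          (fun j hjl => by rw [List.getElem?_set_ne (by omega)]; exact hrow j hjl)
          (List.getElem?_set_self (by simpa using hlen))
      simp only [List.set_set] at ih'
      rw [ih']
      have hcnd : 1 ≤ c ∧ c ≤ i := ⟨hc, by omega⟩
      simp only [List.map_cons, List.sum_cons, if_pos hcnd]
      ring_nf
    · rw [List.foldl_cons]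
      simp only [if_neg hg, List.set_set]
      have ih' := ih (fun x hx => hl x (List.mem_cons_of_mem _ hx)) dp v hlen hrow hv
      simp only [List.set_set] at ih'
      rw [ih']
      have hcnd : ¬ (1 ≤ c ∧ c ≤ i) := by omega
      simp only [List.map_cons, List.sum_cons, if_neg hcnd, zero_add]

-- the table after processing indices 0..m
def DA (coins : List Int) (N m : Nat) : List (Int × Int) :=
  (List.range (N + 1)).map (fun j => if j ≤ m then (Of coins j, Ef coins j) else (0, 0))

lemma DA_length (coins : List Int) (N m : Nat) : (DA coins N m).length = N + 1 := by
  simp [DA]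

lemma DA_get (coins : List Int) (N m j : Nat) (hj : j < N + 1) :
    (DA coins N m)[j]? = some (if j ≤ m then (Of coins j, Ef coins j) else (0, 0)) := by
  simp [DA, List.getElem?_map, List.getElem?_range hj]

lemma stepA_zero (coins : List Int) (h1 : ∀ c ∈ coins, 1 ≤ c) (dp : List (Int × Int)) :
    stepA coins dp 0 = dp := by
  unfold stepA
  induction coins with
  | nil => rfl
  | cons c t ih =>
    rw [List.foldl_cons, if_neg (by have := h1 c List.mem_cons_self; omega)]
    exact ih (fun x hx => h1 x (List.mem_cons_of_mem _ hx))

lemma initA_eq (coins : List Int) (N : Nat) :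
    ((PySem.List.pyRange 0 ((N : Int) + 1) 1).map (fun _ => ((0 : Int), (0 : Int)))).set 0 (0, 1)
      = DA coins N 0 := by
  have hlen : (PySem.List.pyRange 0 ((N : Int) + 1) 1).length = N + 1 := by
    rw [PySem.List.length_pyRange_one]; omega
  apply List.ext_getElem?
  intro j
  by_cases hj : j < N + 1
  · rcases Nat.eq_zero_or_pos j with rfl | hj0
    · rw [List.getElem?_set_self (by rw [List.length_map, hlen]; omega), DA_get coins N 0 0 hj]
      simp [Of, Ef]
    · rw [List.getElem?_set_ne (by omega), DA_get coins N 0 j hj, if_neg (by omega),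
        List.getElem?_map, List.getElem?_eq_getElem (by rw [hlen]; omega)]
      simp
  · rw [List.getElem?_eq_none (by rw [List.length_set, List.length_map, hlen]; omega),
      List.getElem?_eq_none (by rw [DA_length]; omega)]

lemma DA_set (coins : List Int) (N m : Nat) (h : m + 1 ≤ N) :
    (DA coins N m).set (m + 1) (Of coins (m + 1), Ef coins (m + 1)) = DA coins N (m + 1) := by
  apply List.ext_getElem?
  intro j
  by_cases hj : j < N + 1
  · by_cases hje : j = m + 1
    · subst hje
      rw [List.getElem?_set_self (by rw [DA_length]; omega), DA_get _ _ _ _ hj, if_pos le_rfl]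
    · rw [List.getElem?_set_ne (by omega), DA_get _ _ _ _ hj, DA_get _ _ _ _ hj]
      congr 1
      by_cases hjm : j ≤ m
      · rw [if_pos hjm, if_pos (by omega)]
      · rw [if_neg hjm, if_neg (by omega)]
  · rw [List.getElem?_eq_none (by rw [List.length_set, DA_length]; omega),
      List.getElem?_eq_none (by rw [DA_length]; omega)]

lemma outerA (coins : List Int) (h1 : ∀ c ∈ coins, 1 ≤ c) (N : Nat) :
    ∀ m : Nat, m ≤ N →
    (PySem.List.pyRange 0 ((m : Int) + 1) 1).foldl (stepA coins)
      (((PySem.List.pyRange 0 ((N : Int) + 1) 1).map (fun _ => ((0 : Int), (0 : Int)))).set 0 (0, 1))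
    = DA coins N m := by
  intro m
  induction m with
  | zero =>
    intro _
    rw [show ((0 : Nat) : Int) + 1 = (0 : Int) + 1 by norm_num, PySem.List.pyRange_one_singleton]
    rw [List.foldl_cons, List.foldl_nil, stepA_zero coins h1]
    exact initA_eq coins N
  | succ m ih =>
    intro hm
    have hm' : m ≤ N := by omega
    have hsplit : PySem.List.pyRange 0 (((m + 1 : Nat) : Int) + 1) 1
        = PySem.List.pyRange 0 ((m : Int) + 1) 1 ++ [(m : Int) + 1] := by
      have h := PySem.List.pyRange_one_succ_right (a := 0) (b := (m : Int) + 1) (by omega)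
      rw [show (((m + 1 : Nat) : Int) + 1) = ((m : Int) + 1) + 1 by push_cast; ring]
      exact h
    rw [hsplit, List.foldl_append, ih hm', List.foldl_cons, List.foldl_nil]
    have hstep := stepA_inner coins ((m : Int) + 1) (by omega) coins h1
      (DA coins N m) (0, 0)
      (by rw [DA_length]; omega)
      (fun j hjl => by
        rw [DA_get coins N m j (by omega), if_pos (by omega)])
      (by rw [DA_get coins N m (((m : Int) + 1).toNat) (by omega), if_neg (by omega)])
    have hfold : stepA coins (DA coins N m) ((m : Int) + 1) = _ := hstep
    rw [hfold]
    have htn : ((m : Int) + 1).toNat = m + 1 := by omega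
    rw [htn]
    rw [show (0 : Int) + (coins.map (fun c => if 1 ≤ c ∧ c ≤ (m : Int) + 1 then Ef coins (m + 1 - c.toNat) else 0)).sum
        = Of coins (m + 1) from by
      rw [Of_eq_sum coins (m + 1)]; push_cast; ring_nf]
    rw [show (0 : Int) + (coins.map (fun c => if 1 ≤ c ∧ c ≤ (m : Int) + 1 then Of coins (m + 1 - c.toNat) else 0)).sum
        = Ef coins (m + 1) from by
      rw [Ef_eq_sum coins (m + 1) (by omega)]; push_cast; ring_nf]
    exact DA_set coins N m hm

lemma A_val (coins : List Int) (total : Int) (ht : 0 ≤ total) (h1 : ∀ c ∈ coins, 1 ≤ c) :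
    lecture14 coins total = Ef coins total.toNat := by
  rw [lecture14_eq]
  rw [show total = ((total.toNat : Nat) : Int) from by omega]
  rw [outerA coins h1 total.toNat total.toNat le_rfl]
  rw [PySem.List.pyGet?_natCast, DA_get coins total.toNat total.toNat total.toNat (by omega),
    if_pos le_rfl]
  rfl

-- ===== port B: loop characterisations =====

-- ===== port B: pair-sum histogram characterisation =====

lemma pairInner (total c1 : Int) (k : Nat) (hk0 : 0 ≤ total) (hk : (k : Int) ≤ total) :
    ∀ (l : List Int), ∀ (ps : List Int) (v : Int), ps[k]? = some v →
    (l.foldl (pairStep total c1) ps)[k]?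
      = some (v + (l.map (fun c2 => if c1 + c2 = (k : Int) then (1 : Int) else 0)).sum) := by
  intro l
  induction l with
  | nil => intro ps v hv; simpa using hv
  | cons c2 t ih =>
    intro ps v hv
    have hklen : k < ps.length := (List.getElem?_eq_some_iff.mp hv).choose
    rw [List.foldl_cons]
    simp only [pairStep] at ih ⊢
    by_cases hcond : 0 ≤ c1 + c2 ∧ c1 + c2 ≤ total
    · simp only [if_pos hcond]
      by_cases heq : c1 + c2 = (k : Int)
      · have htn : (c1 + c2).toNat = k := by omega
        have hget : PySem.List.pyGet? ps (c1 + c2) = some v := by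
          rw [PySem.List.pyGet?_of_nonneg ps hcond.1, htn]; exact hv
        rw [hget, Option.getD_some, htn,
          ih (ps.set k (v + 1)) (v + 1) (List.getElem?_set_self hklen)]
        rw [List.map_cons, List.sum_cons, if_pos heq]
        congr 1
        ring
      · have htn : (c1 + c2).toNat ≠ k := by omega
        rw [ih (ps.set (c1 + c2).toNat _) v (by rw [List.getElem?_set_ne htn]; exact hv)]
        rw [List.map_cons, List.sum_cons, if_neg heq, zero_add]
    · simp only [if_neg hcond]
      rw [ih ps v hv, List.map_cons, List.sum_cons,
        if_neg (fun heq => hcond (by omega)), zero_add]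

lemma pairOuter (inner : List Int) (total : Int) (k : Nat) (hk0 : 0 ≤ total) (hk : (k : Int) ≤ total) :
    ∀ (l1 : List Int), ∀ (ps : List Int) (v : Int), ps[k]? = some v →
    (l1.foldl (fun ps c1 => inner.foldl (pairStep total c1) ps) ps)[k]?
      = some (v + (l1.map (fun c1 =>
          (inner.map (fun c2 => if c1 + c2 = (k : Int) then (1 : Int) else 0)).sum)).sum) := by
  intro l1
  induction l1 with
  | nil => intro ps v hv; simpa using hv
  | cons c1 t ih =>
    intro ps v hv
    rw [List.foldl_cons]
    have hstep := pairInner total c1 k hk0 hk inner ps v hv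
    rw [ih (inner.foldl (pairStep total c1) ps) _ hstep, List.map_cons, List.sum_cons]
    congr 1
    ring

lemma pairFold_get (coins : List Int) (total : Int) (ht : 0 ≤ total) (k : Nat)
    (hk : (k : Int) ≤ total) :
    (pairFold coins total)[k]? = some (cntI coins (k : Int)) := by
  unfold pairFold
  have hzero : ((PySem.List.pyRange 0 (total + 1) 1).map (fun _ => (0 : Int)))[k]? = some 0 := by
    rw [List.getElem?_map,
      List.getElem?_eq_getElem (by rw [PySem.List.length_pyRange_one]; omega)]
    simp
  rw [pairOuter coins total k ht hk coins _ 0 hzero]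
  unfold cntI
  rw [zero_add]

-- Ef_comp re-indexed over List.range (matches the zip-of-reversed-prefix step of port B)
lemma Ef_comp' (coins : List Int) (h1 : ∀ c ∈ coins, 1 ≤ c) (i : Nat) :
    Ef coins (i + 1) =
    ((List.range (i + 1)).map (fun (k : Nat) => cntI coins ((k : Int) + 1) * Ef coins (i - k))).sum := by
  rw [Ef_comp coins h1 i, PySem.List.pyRange_one]
  rw [show ((((i : Int) + 1) + 1 - 1)).toNat = i + 1 from by omega, List.map_map]
  apply congrArg List.sum
  apply List.map_congr_left
  intro k hk
  rw [List.mem_range] at hk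
  simp only [Function.comp_apply]
  rw [show (1 : Int) + (k : Int) = (k : Int) + 1 from by ring,
    show (((i : Int) + 1) - ((k : Int) + 1)).toNat = i - k from by omega]

-- the 1D table after processing indices 1..m: g = [Ef 0, …, Ef m]
def EL (coins : List Int) (m : Nat) : List Int := (List.range (m + 1)).map (fun j => Ef coins j)

lemma arr_getD (l : List Int) (k : Nat) (d : Int) : l.toArray.getD k d = l.getD k d := by
  simp [Array.getD, List.getD]
  split
  · simp_all
  · simp_all [Option.getD]

lemma cntI_zero (coins : List Int) (h1 : ∀ c ∈ coins, 1 ≤ c) : cntI coins 0 = 0 := by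
  unfold cntI
  apply List.sum_eq_zero
  intro x hx
  obtain ⟨c1, hc1, rfl⟩ := List.mem_map.mp hx
  apply List.sum_eq_zero
  intro y hy
  obtain ⟨c2, hc2, rfl⟩ := List.mem_map.mp hy
  have := h1 c1 hc1
  have := h1 c2 hc2
  exact if_neg (by omega)

-- dropping the zero-count entries does not change a sum whose terms vanish there
lemma sum_filter_nz (l : List (Int × Int)) (F : Int × Int → Int)
    (h : ∀ p ∈ l, p.2 = 0 → F p = 0) :
    ((l.filter (fun p => p.2 != 0)).map F).sum = (l.map F).sum := by
  induction l with
  | nil => rfl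
  | cons p t ih =>
    rw [List.filter_cons]
    by_cases hp : p.2 = 0
    · rw [if_neg (by simp [hp]), ih (fun q hq => h q (List.mem_cons_of_mem _ hq)),
        List.map_cons, List.sum_cons, h p List.mem_cons_self hp, zero_add]
    · rw [if_pos (by simp [hp]), List.map_cons, List.sum_cons,
        ih (fun q hq => h q (List.mem_cons_of_mem _ hq)), List.map_cons, List.sum_cons]

lemma sum_enumerate (P : List Int) (F : Int × Int → Int) :
    ((PySem.List.enumerate P).map F).sum
      = ((List.range P.length).map (fun (k : Nat) => F ((k : Int), P.getD k 0))).sum := by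
  rw [PySem.List.enumerate_eq_map_pyRange P 0, List.map_map, PySem.List.len_eq,
    PySem.List.pyRange_one, show (((P.length : Int)) - 0).toNat = P.length from by omega,
    List.map_map]
  apply congrArg List.sum
  apply List.map_congr_left
  intro k _
  simp only [Function.comp_apply, zero_add, PySem.List.pyGetD_natCast]

lemma foldl_pairStep_length (total c1 : Int) :
    ∀ (l : List Int) (ps : List Int), (l.foldl (pairStep total c1) ps).length = ps.length := by
  intro l
  induction l with
  | nil => intro ps; rfl
  | cons c2 t ih =>
    intro ps
    rw [List.foldl_cons, ih]
    unfold pairStep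
    dsimp only
    split
    · rw [List.length_set]
    · rfl

lemma pairFold_length (coins : List Int) (total : Int) (ht : 0 ≤ total) :
    (pairFold coins total).length = total.toNat + 1 := by
  unfold pairFold
  have h : ∀ (l : List Int) (ps : List Int),
      (l.foldl (fun ps c1 => coins.foldl (pairStep total c1) ps) ps).length = ps.length := by
    intro l
    induction l with
    | nil => intro ps; rfl
    | cons c1 t ih => intro ps; rw [List.foldl_cons, ih, foldl_pairStep_length]
  rw [h, List.length_map, PySem.List.length_pyRange_one]
  omega

lemma P_eq (coins : List Int) (total : Int) (ht : 0 ≤ total) :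
    pairFold coins total = (List.range (total.toNat + 1)).map (fun (k : Nat) => cntI coins (k : Int)) := by
  apply List.ext_getElem?
  intro k
  by_cases hk : k < total.toNat + 1
  · rw [pairFold_get coins total ht k (by omega), List.getElem?_map, List.getElem?_range hk]
    simp only [Option.map_some]
  · rw [List.getElem?_eq_none (by rw [pairFold_length coins total ht]; omega),
      List.getElem?_eq_none (by rw [List.length_map, List.length_range]; omega)]

-- the truncated composition sum equals Ef (m+1)
lemma sum_trunc (coins : List Int) (h1 : ∀ c ∈ coins, 1 ≤ c) (N m : Nat) (hm : m + 1 ≤ N) :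
    ((List.range N).map (fun k =>
      if k ≤ m then cntI coins ((k : Int) + 1) * Ef coins (m - k) else 0)).sum
    = Ef coins (m + 1) := by
  have hN : N = (m + 1) + (N - (m + 1)) := by omega
  rw [hN, List.range_add, List.map_append, List.sum_append, List.map_map]
  have h2 : ((List.map (fun x => m + 1 + x) (List.range (N - (m + 1)))).map (fun k =>
      if k ≤ m then cntI coins ((k : Int) + 1) * Ef coins (m - k) else 0)).sum = 0 := by
    apply List.sum_eq_zero
    intro x hx
    obtain ⟨k, hk, rfl⟩ := List.mem_map.mp hx
    obtain ⟨j, _, rfl⟩ := List.mem_map.mp hk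
    exact if_neg (by omega)
  rw [List.map_map] at h2
  rw [h2, add_zero]
  have hcg : (List.range (m + 1)).map (fun (k : Nat) =>
        if k ≤ m then cntI coins ((k : Int) + 1) * Ef coins (m - k) else 0)
      = (List.range (m + 1)).map (fun (k : Nat) => cntI coins ((k : Int) + 1) * Ef coins (m - k)) :=
    List.map_congr_left (fun k hk => if_pos (by rw [List.mem_range] at hk; omega))
  rw [hcg]
  exact (Ef_comp' coins h1 m).symm

lemma sum_trunc' (coins : List Int) (h1 : ∀ c ∈ coins, 1 ≤ c) (N m : Nat) (hm : m + 1 ≤ N) :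
    ((List.range (N + 1)).map (fun (k : Nat) =>
      if 1 ≤ k ∧ k ≤ m + 1 then cntI coins (k : Int) * Ef coins (m + 1 - k) else 0)).sum
    = Ef coins (m + 1) := by
  rw [List.range_succ_eq_map, List.map_cons, List.sum_cons, if_neg (by omega), zero_add,
    List.map_map]
  have hcg : (List.range N).map ((fun (k : Nat) =>
        if 1 ≤ k ∧ k ≤ m + 1 then cntI coins (k : Int) * Ef coins (m + 1 - k) else 0) ∘ Nat.succ)
      = (List.range N).map (fun (k : Nat) =>
        if k ≤ m then cntI coins ((k : Int) + 1) * Ef coins (m - k) else 0) := by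
    apply List.map_congr_left
    intro k _
    simp only [Function.comp_apply]
    by_cases hkm : k ≤ m
    · rw [if_pos (by omega), if_pos hkm,
        show ((Nat.succ k : Nat) : Int) = (k : Int) + 1 from by push_cast; ring,
        show m + 1 - Nat.succ k = m - k from by omega]
    · rw [if_neg (by omega), if_neg hkm]
  rw [hcg]
  exact sum_trunc coins h1 N m hm

-- the value pushed at step m+1 of port B's g-loop is Ef (m+1)
lemma gStep_value (coins : List Int) (total : Int) (ht : 0 ≤ total)
    (h1 : ∀ c ∈ coins, 1 ≤ c) (m : Nat) (hm : m + 1 ≤ total.toNat) :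
    ((((PySem.List.enumerate (pairFold coins total)).filter (fun p => p.2 != 0)).map
      (fun p => if p.1 ≤ (m : Int) + 1
        then p.2 * (EL coins m).toArray.getD (((m : Int) + 1 - p.1)).toNat 0 else 0)).sum)
    = Ef coins (m + 1) := by
  rw [sum_filter_nz _ _ (fun p _ hp => by rw [hp]; simp)]
  rw [sum_enumerate, P_eq coins total ht, List.length_map, List.length_range]
  trans ((List.range (total.toNat + 1)).map (fun (k : Nat) =>
    if 1 ≤ k ∧ k ≤ m + 1 then cntI coins (k : Int) * Ef coins (m + 1 - k) else 0)).sum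
  · apply congrArg List.sum
    apply List.map_congr_left
    intro k hk
    rw [List.mem_range] at hk
    dsimp only
    rw [PySem.List.getD_map_range _ _ _ _ hk]
    by_cases hk0 : k = 0
    · subst hk0
      rw [if_pos (by omega), if_neg (by omega),
        show ((0 : Nat) : Int) = (0 : Int) from rfl, cntI_zero coins h1, zero_mul]
    · by_cases hkm : k ≤ m + 1
      · rw [if_pos (by omega), if_pos ⟨by omega, hkm⟩, arr_getD]
        unfold EL
        rw [show (((m : Int) + 1 - (k : Int))).toNat = m + 1 - k from by omega,
          PySem.List.getD_map_range _ _ _ _ (by omega)]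
      · rw [if_neg (by omega), if_neg (by omega)]
  · exact sum_trunc' coins h1 total.toNat m hm

lemma outerB (coins : List Int) (h1 : ∀ c ∈ coins, 1 ≤ c) (total : Int) (ht : 0 ≤ total) :
    ∀ m : Nat, m ≤ total.toNat →
    (PySem.List.pyRange 1 ((m : Int) + 1) 1).foldl
      (gStep ((PySem.List.enumerate (pairFold coins total)).filter (fun p => p.2 != 0)))
      #[1]
    = (EL coins m).toArray := by
  intro m
  induction m with
  | zero =>
    intro _
    rw [PySem.List.pyRange_one_eq_nil (a := 1) (b := ((0 : Nat) : Int) + 1) (by norm_num),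
      List.foldl_nil]
    simp [EL, Ef, List.range_succ]
  | succ m ih =>
    intro hm
    have hsplit : PySem.List.pyRange 1 (((m + 1 : Nat) : Int) + 1) 1
        = PySem.List.pyRange 1 ((m : Int) + 1) 1 ++ [(m : Int) + 1] := by
      have h := PySem.List.pyRange_one_succ_right (a := 1) (b := (m : Int) + 1) (by omega)
      rw [show (((m + 1 : Nat) : Int) + 1) = ((m : Int) + 1) + 1 by push_cast; ring]
      exact h
    rw [hsplit, List.foldl_append, ih (by omega), List.foldl_cons, List.foldl_nil]
    unfold gStep
    rw [gStep_value coins total ht h1 m hm, List.push_toArray]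
    rw [show EL coins m ++ [Ef coins (m + 1)] = EL coins (m + 1) from by
      simp [EL, List.range_succ]]

lemma B_val (coins : List Int) (total : Int) (ht : 0 ≤ total) (h1 : ∀ c ∈ coins, 1 ≤ c) :
    lecture14_alt coins total = Ef coins total.toNat := by
  rw [lecture14_alt_eq, if_neg (by omega),
    if_neg (by
      simp only [List.any_eq_true, not_exists]
      intro c
      rw [not_and]
      intro hc
      have := h1 c hc
      simp
      omega)]
  rw [show (total + 1) = ((total.toNat : Nat) : Int) + 1 from by omega]
  rw [outerB coins h1 total (by omega) total.toNat le_rfl]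
  rw [arr_getD]
  unfold EL
  rw [PySem.List.getD_map_range _ _ _ _ (by omega)]

lemma lecture14_spec' (coins : List Int) (total : Int)
    (ht : 0 ≤ total) (h1 : ∀ c ∈ coins, 1 ≤ c) :
    lecture14 coins total = lecture14_alt coins total := by
  rw [A_val coins total ht h1, B_val coins total ht h1]

-- ===== VERDICT (by name: the statement is the Claim_ definition above) =====
theorem lecture14_spec : Claim_equal_lecture14 := by
  intro coins total _ hpre
  unfold Spec_lecture14
  exact lecture14_spec' coins total hpre.1 hpre.2
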